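-- pv_equiv track=rewrite | github.com/guitarbeat/slavv2python | source/slavv/core/graph.py | _interior_components
-- ===== SOURCE A (Python) =====
-- def _interior_components(
--     interior_vertices: set[int],
--     adjacency_list: dict[int, set[int]],
-- ) -> list[list[int]]:
--     """Return connected components of the degree-2 interior-vertex subgraph."""
--     components: list[list[int]] = []
--     visited: set[int] = set()
--
--     for start in sorted(interior_vertices):
--         if start in visited:
--             continue
--         stack = [start]
--         component: list[int] = []
--         while stack:
--             vertex = stack.pop()
--             if vertex in visited:
--                 continue
--             visited.add(vertex)
--             component.append(vertex)
--             for neighbor in sorted(adjacency_list[vertex], reverse=True):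
--                 if neighbor in interior_vertices and neighbor not in visited:
--                     stack.append(neighbor)
--         components.append(sorted(component))
--
--     return components
-- ===== SOURCE B (Python) =====
-- def _interior_components(
--     interior_vertices: set[int],
--     adjacency_list: dict[int, set[int]],
-- ) -> list[list[int]]:
--     """Frontier-saturation (level-wise BFS) instead of an explicit DFS stack."""
--     components: list[list[int]] = []
--     visited: set[int] = set()
--
--     for start in sorted(interior_vertices):
--         if start in visited:
--             continue
--         comp = {start}
--         frontier = {start}
--         while frontier:
--             nxt: set[int] = set()
--             for u in frontier:
--                 for n in adjacency_list[u]: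
--                     if n in interior_vertices and n not in visited and n not in comp:
--                         nxt.add(n)
--             comp |= nxt
--             frontier = nxt
--         visited |= comp
--         components.append(sorted(comp))
--
--     return components
-- ===== Notes on version B (the rewrite author's own statement) =====
-- stated objective: alternative
-- what changed: Replaces A's explicit DFS stack (pop, push reverse-sorted neighbours, visited-check at pop) by level-wise frontier saturation: each pass computes the set of new interior neighbours of the whole frontier and unions it into the component until the frontier is empty.
import Mathlib
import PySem

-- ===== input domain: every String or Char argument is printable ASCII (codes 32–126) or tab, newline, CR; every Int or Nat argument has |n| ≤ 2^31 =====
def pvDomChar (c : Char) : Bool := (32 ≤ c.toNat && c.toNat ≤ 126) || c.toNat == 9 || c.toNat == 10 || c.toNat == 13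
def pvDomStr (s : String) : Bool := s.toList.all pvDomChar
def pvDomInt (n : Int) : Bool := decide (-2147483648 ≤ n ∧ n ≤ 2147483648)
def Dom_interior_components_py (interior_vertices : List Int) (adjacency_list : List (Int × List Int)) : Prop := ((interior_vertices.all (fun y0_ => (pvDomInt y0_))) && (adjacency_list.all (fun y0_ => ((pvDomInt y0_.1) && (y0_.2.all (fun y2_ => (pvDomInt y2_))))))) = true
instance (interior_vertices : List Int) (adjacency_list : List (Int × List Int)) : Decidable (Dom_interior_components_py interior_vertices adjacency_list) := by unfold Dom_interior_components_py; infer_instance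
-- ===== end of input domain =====

-- B replaces A's explicit DFS stack by level-wise frontier saturation (a different traversal); equivalence is about the return value only (neither version mutates its arguments).

-- dict access adjacency_list[v] (first match); Pre_ guarantees the key exists, so the [] default is never taken
def pvAdjGet (adj : List (Int × List Int)) (v : Int) : List Int := (List.lookup v adj).getD []

-- termination helpers for both ports
theorem pvLengthFilterLe {α : Type} (l : List α) (p q : α → Bool)
    (himp : ∀ x, q x = true → p x = true) :
    (l.filter q).length ≤ (l.filter p).length := by
  induction l with
  | nil => simp
  | cons a t ih =>
    simp only [List.filter_cons]
    cases hqa : q a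
    · cases hpa : p a
      · simpa using ih
      · simpa using Nat.le_succ_of_le ih
    · simp only [himp a hqa]
      exact Nat.succ_le_succ ih

theorem pvLengthFilterLt {α : Type} (l : List α) (p q : α → Bool)
    (himp : ∀ x, q x = true → p x = true) (x : α) (hm : x ∈ l)
    (hp : p x = true) (hq : q x = false) :
    (l.filter q).length < (l.filter p).length := by
  induction l with
  | nil => cases hm
  | cons a t ih =>
    rcases List.mem_cons.mp hm with rfl | hm
    · simp only [List.filter_cons, hp, hq]
      simpa using Nat.lt_succ_of_le (pvLengthFilterLe t p q himp)
    · simp only [List.filter_cons]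
      cases hqa : q a
      · cases hpa : p a
        · simpa using ih hm
        · simpa using Nat.lt_succ_of_lt (ih hm)
      · simp only [himp a hqa]
        exact Nat.succ_lt_succ (ih hm)

-- ===== PORT A =====
-- A's inner while loop: explicit stack (head = top), pop, mark visited, push the
-- reverse-sorted interior unvisited neighbours (head-stack form: ascending ++ rest)
def pvDfsA (I : List Int) (adj : List (Int × List Int)) (visited stack comp : List Int)
    (h : ∀ x ∈ stack, x ∈ I) : List Int × List Int :=
  match stack with
  | [] => (visited, comp)
  | v :: rest =>
    if hv : v ∈ visited then
      pvDfsA I adj visited rest comp (fun x hx => h x (List.mem_cons_of_mem _ hx))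
    else
      pvDfsA I adj (PySem.Set.add visited v)
        (((PySem.List.sorted (pvAdjGet adj v) (fun x => x) false).filter
            (fun n => decide (n ∈ I) && decide (n ∉ PySem.Set.add visited v))) ++ rest)
        (comp ++ [v])
        (fun x hx => by
          rcases List.mem_append.mp hx with hx | hx
          · have := (List.mem_filter.mp hx).2
            simp only [Bool.and_eq_true, decide_eq_true_eq] at this
            exact this.1
          · exact h x (List.mem_cons_of_mem _ hx))
  termination_by ((I.filter (fun x => decide (x ∉ visited))).length, stack.length)
  decreasing_by
  · apply Prod.Lex.right; simp
  · apply Prod.Lex.left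
    apply pvLengthFilterLt _ _ _ ?_ v (h v List.mem_cons_self)
    · simpa using hv
    · simp [PySem.Set.mem_add]
    · intro x hx
      simp only [decide_eq_true_eq, PySem.Set.mem_add] at *
      tauto

-- A's outer for loop over sorted(interior_vertices)
def pvLoopA (I : List Int) (adj : List (Int × List Int)) (starts : List Int)
    (h : ∀ x ∈ starts, x ∈ I) (visited : List Int) (comps : List (List Int)) : List (List Int) :=
  match starts with
  | [] => comps
  | s :: rest =>
    if s ∈ visited then
      pvLoopA I adj rest (fun x hx => h x (List.mem_cons_of_mem _ hx)) visited comps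
    else
      let r := pvDfsA I adj visited [s] []
        (fun x hx => by rcases List.mem_singleton.mp hx with rfl; exact h x List.mem_cons_self)
      pvLoopA I adj rest (fun x hx => h x (List.mem_cons_of_mem _ hx)) r.1
        (comps ++ [PySem.List.sorted r.2 (fun x => x) false])

def interior_components_py (interior_vertices : List Int) (adjacency_list : List (Int × List Int)) : List (List Int) :=
  pvLoopA interior_vertices adjacency_list
    (PySem.List.sorted interior_vertices (fun x => x) false)
    (fun x hx => (PySem.List.mem_sorted _ _ _ x).mp hx) [] []

-- ===== PORT B =====
-- one frontier expansion: nxt = {n | u in frontier, n in adj[u], n interior, unvisited, not in comp}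
def pvNext (I : List Int) (adj : List (Int × List Int)) (visited comp frontier : List Int) : List Int :=
  frontier.foldl (fun acc u =>
    (pvAdjGet adj u).foldl (fun acc2 n =>
      if n ∈ I ∧ n ∉ visited ∧ n ∉ comp then PySem.Set.add acc2 n else acc2) acc) []

theorem pvMem_innerFold (I visited comp : List Int) (l acc : List Int) (x : Int) :
    (x ∈ l.foldl (fun acc2 n => if n ∈ I ∧ n ∉ visited ∧ n ∉ comp then PySem.Set.add acc2 n else acc2) acc ↔
      x ∈ acc ∨ (x ∈ l ∧ x ∈ I ∧ x ∉ visited ∧ x ∉ comp)) := by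
  induction l generalizing acc with
  | nil => simp
  | cons a t ih =>
    simp only [List.foldl_cons]
    by_cases ha : a ∈ I ∧ a ∉ visited ∧ a ∉ comp
    · rw [if_pos ha, ih]
      simp only [PySem.Set.mem_add, List.mem_cons]
      by_cases hxa : x = a
      · subst hxa; simp [ha]
      · simp [hxa]
    · rw [if_neg ha, ih]
      simp only [List.mem_cons]
      by_cases hxa : x = a
      · subst hxa; tauto
      · simp [hxa]

theorem pvMem_next (I : List Int) (adj : List (Int × List Int)) (visited comp frontier : List Int) (x : Int) :
    x ∈ pvNext I adj visited comp frontier ↔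
      (∃ u ∈ frontier, x ∈ pvAdjGet adj u) ∧ x ∈ I ∧ x ∉ visited ∧ x ∉ comp := by
  have main : ∀ (fr acc : List Int),
      (x ∈ fr.foldl (fun acc u =>
          (pvAdjGet adj u).foldl (fun acc2 n =>
            if n ∈ I ∧ n ∉ visited ∧ n ∉ comp then PySem.Set.add acc2 n else acc2) acc) acc ↔
        x ∈ acc ∨ ((∃ u ∈ fr, x ∈ pvAdjGet adj u) ∧ x ∈ I ∧ x ∉ visited ∧ x ∉ comp)) := by
    intro fr
    induction fr with
    | nil => simp
    | cons a t ih =>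
      intro acc
      simp only [List.foldl_cons]
      rw [ih, pvMem_innerFold]
      simp only [List.mem_cons]
      constructor
      · rintro ((hacc | ⟨h1, h2⟩) | ⟨⟨u, hu, hxu⟩, h2⟩)
        · exact Or.inl hacc
        · exact Or.inr ⟨⟨a, Or.inl rfl, h1⟩, h2⟩
        · exact Or.inr ⟨⟨u, Or.inr hu, hxu⟩, h2⟩
      · rintro (hacc | ⟨⟨u, (rfl | hu), hxu⟩, h2⟩)
        · exact Or.inl (Or.inl hacc)
        · exact Or.inl (Or.inr ⟨hxu, h2⟩)
        · exact Or.inr ⟨⟨u, hu, hxu⟩, h2⟩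
  simpa using main frontier []

-- B's while loop: saturate comp by repeated frontier expansion
def pvSatB (I : List Int) (adj : List (Int × List Int)) (visited comp frontier : List Int) : List Int :=
  match frontier with
  | [] => comp
  | _ :: _ =>
    pvSatB I adj visited (PySem.Set.update comp (pvNext I adj visited comp frontier))
      (pvNext I adj visited comp frontier)
  termination_by ((I.filter (fun x => decide (x ∉ comp))).length, frontier.length)
  decreasing_by
  by_cases hn : pvNext I adj visited comp frontier = []
  · rw [hn]
    apply Prod.Lex.right'
    · simp [PySem.Set.update]
    · simp
  · apply Prod.Lex.left
    rcases List.exists_mem_of_ne_nil _ hn with ⟨y, hy⟩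
    have hy' := (pvMem_next I adj visited comp frontier y).mp hy
    apply pvLengthFilterLt _ _ _ ?_ y hy'.2.1
    · simpa using hy'.2.2.2
    · simp only [decide_eq_false_iff_not, not_not, PySem.Set.mem_update]
      exact Or.inr hy
    · intro x hx
      simp only [decide_eq_true_eq, PySem.Set.mem_update] at *
      tauto

-- B's outer for loop
def pvLoopB (I : List Int) (adj : List (Int × List Int)) (starts visited : List Int)
    (comps : List (List Int)) : List (List Int) :=
  match starts with
  | [] => comps
  | s :: rest =>
    if s ∈ visited then pvLoopB I adj rest visited comps
    else
      let comp := pvSatB I adj visited [s] [s]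
      pvLoopB I adj rest (PySem.Set.update visited comp)
        (comps ++ [PySem.List.sorted comp (fun x => x) false])

def interior_components_py_alt (interior_vertices : List Int) (adjacency_list : List (Int × List Int)) : List (List Int) :=
  pvLoopB interior_vertices adjacency_list
    (PySem.List.sorted interior_vertices (fun x => x) false) [] []

-- ===== PRECONDITION & SPEC =====
-- Pre_ excludes exactly the inputs where Python raises KeyError: some interior vertex has no
-- adjacency_list entry (every interior vertex's adjacency is eventually read).
def Pre_interior_components_py (interior_vertices : List Int) (adjacency_list : List (Int × List Int)) : Prop :=
  ∀ v ∈ interior_vertices, (List.lookup v adjacency_list).isSome = true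
instance (interior_vertices : List Int) (adjacency_list : List (Int × List Int)) : Decidable (Pre_interior_components_py interior_vertices adjacency_list) := by unfold Pre_interior_components_py; infer_instance

def pvWitness_interior_components_py : List Int × (List (Int × List Int)) :=
  ([1, 2, 4], [(1, [2]), (2, [1, 4]), (4, [2]), (9, [1])])

def Spec_interior_components_py (interior_vertices : List Int) (adjacency_list : List (Int × List Int)) (out : List (List Int)) : Prop := out = interior_components_py_alt interior_vertices adjacency_list
instance (interior_vertices : List Int) (adjacency_list : List (Int × List Int)) (out : List (List Int)) : Decidable (Spec_interior_components_py interior_vertices adjacency_list out) := by unfold Spec_interior_components_py; infer_instance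

-- ===== CLAIM (what is proved, stated in full; the proofs are below) =====
def Claim_equal_interior_components_py : Prop := ∀ (interior_vertices : List Int) (adjacency_list : List (Int × List Int)), Dom_interior_components_py interior_vertices adjacency_list → Pre_interior_components_py interior_vertices adjacency_list → Spec_interior_components_py interior_vertices adjacency_list (interior_components_py interior_vertices adjacency_list)

-- ===== LEMMAS AND PROOFS =====

-- one step of either traversal: move to an interior neighbour not in the avoided set A
def pvStep (I : List Int) (adj : List (Int × List Int)) (A : Int → Prop) (u v : Int) : Prop :=
  v ∈ I ∧ v ∈ pvAdjGet adj u ∧ ¬ A v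

theorem pvReach_mono (I : List Int) (adj : List (Int × List Int)) (A B : Int → Prop)
    (hAB : ∀ x, A x → B x) (u v : Int)
    (h : Relation.ReflTransGen (pvStep I adj B) u v) :
    Relation.ReflTransGen (pvStep I adj A) u v := by
  refine Relation.ReflTransGen.mono ?_ h
  intro a b hab
  exact ⟨hab.1, hab.2.1, fun hA => hab.2.2 (hAB _ hA)⟩

-- rerouting a path around a freshly avoided set S: either the endpoint is in S, or the
-- path avoids S entirely, or its tail restarts at a successor n of some m ∈ S
theorem pvReroute (I : List Int) (adj : List (Int × List Int)) (A : Int → Prop) (S : List Int)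
    (s x : Int) (h : Relation.ReflTransGen (pvStep I adj A) s x) :
    x ∈ S ∨ (s ∉ S ∧ Relation.ReflTransGen (pvStep I adj (fun y => A y ∨ y ∈ S)) s x) ∨
      ∃ n, n ∉ S ∧ (∃ m ∈ S, pvStep I adj A m n) ∧
        Relation.ReflTransGen (pvStep I adj (fun y => A y ∨ y ∈ S)) n x := by
  induction h using Relation.ReflTransGen.head_induction_on with
  | refl =>
    by_cases hxS : x ∈ S
    · exact Or.inl hxS
    · exact Or.inr (Or.inl ⟨hxS, Relation.ReflTransGen.refl⟩)
  | head hac hcx ih =>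
    rename_i a c
    rcases ih with hxS | ⟨hcS, hcx'⟩ | ⟨n, hnS, hmn, hnx⟩
    · exact Or.inl hxS
    · by_cases haS : a ∈ S
      · exact Or.inr (Or.inr ⟨c, hcS, ⟨a, haS, hac⟩, hcx'⟩)
      · refine Or.inr (Or.inl ⟨haS, Relation.ReflTransGen.head ⟨hac.1, hac.2.1, ?_⟩ hcx'⟩)
        rintro (hA | hS)
        · exact hac.2.2 hA
        · exact hcS hS
    · exact Or.inr (Or.inr ⟨n, hnS, hmn, hnx⟩)

theorem pvDfsA_spec (I : List Int) (adj : List (Int × List Int)) :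
    ∀ (visited stack comp : List Int) (h : ∀ x ∈ stack, x ∈ I),
      (∀ x ∈ comp, x ∈ visited) →
      ((∀ x, x ∈ (pvDfsA I adj visited stack comp h).1 ↔
          (x ∈ visited ∨ x ∈ (pvDfsA I adj visited stack comp h).2)) ∧
       (∀ x, x ∈ (pvDfsA I adj visited stack comp h).2 ↔
          (x ∈ comp ∨ ∃ s ∈ stack, s ∉ visited ∧
            Relation.ReflTransGen (pvStep I adj (· ∈ visited)) s x))) := by
  intro visited stack comp h
  fun_induction pvDfsA I adj visited stack comp h
  case case1 visited comp =>
    intro hcv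
    constructor
    · exact fun x => ⟨fun hx => Or.inl hx, fun hx => hx.elim id (hcv x)⟩
    · intro x; simp
  case case2 =>
    rename_i visited comp v rest hstack hv hdup ih
    intro hcv
    obtain ⟨ih1, ih2⟩ := ih hcv
    refine ⟨ih1, fun x => ?_⟩
    rw [ih2 x]
    constructor
    · rintro (hc | ⟨s, hs, hsv, hr⟩)
      · exact Or.inl hc
      · exact Or.inr ⟨s, List.mem_cons_of_mem _ hs, hsv, hr⟩
    · rintro (hc | ⟨s, hs, hsv, hr⟩)
      · exact Or.inl hc
      · rcases List.mem_cons.mp hs with rfl | hs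
        · exact absurd hv hsv
        · exact Or.inr ⟨s, hs, hsv, hr⟩
  case case3 =>
    rename_i visited comp v rest hstack hv hdup ih
    intro hcv
    have hvI : v ∈ I := hstack v List.mem_cons_self
    have hsubV : ∀ y : Int, y ∈ visited → y ∈ PySem.Set.add visited v := by
      intro y hy; simp [PySem.Set.mem_add]; exact Or.inl hy
    have hcv' : ∀ x ∈ comp ++ [v], x ∈ PySem.Set.add visited v := by
      intro x hx
      rcases List.mem_append.mp hx with hx | hx
      · exact hsubV x (hcv x hx)
      · rcases List.mem_singleton.mp hx with rfl
        simp [PySem.Set.mem_add]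
    obtain ⟨ih1, ih2⟩ := ih hcv'
    have hnb : ∀ n : Int, n ∈ List.filter (fun n => decide (n ∈ I) && decide (n ∉ PySem.Set.add visited v)) (PySem.List.sorted (pvAdjGet adj v) (fun x => x)) ↔ (n ∈ pvAdjGet adj v ∧ n ∈ I ∧ n ∉ PySem.Set.add visited v) := by
      intro n
      simp only [List.mem_filter, PySem.List.mem_sorted, Bool.and_eq_true, decide_eq_true_eq]
    have htr : ∀ a b : Int, Relation.ReflTransGen (pvStep I adj (fun y => y ∈ visited ∨ y ∈ ([v] : List Int))) a b → Relation.ReflTransGen (pvStep I adj (· ∈ PySem.Set.add visited v)) a b := by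
      intro a b hh
      refine pvReach_mono I adj _ _ ?_ a b hh
      intro y hy
      simp only [PySem.Set.mem_add] at hy
      simpa using hy
    have htr' : ∀ a b : Int, Relation.ReflTransGen (pvStep I adj (· ∈ PySem.Set.add visited v)) a b → Relation.ReflTransGen (pvStep I adj (· ∈ visited)) a b := by
      intro a b hh
      exact pvReach_mono I adj _ _ hsubV a b hh
    have hvr := (ih2 v).mpr (Or.inl (by simp))
    constructor
    · intro x
      rw [ih1 x]
      constructor
      · rintro (hx | hx)
        · rcases (by simpa [PySem.Set.mem_add] using hx : x ∈ visited ∨ x = v) with hx' | rfl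
          · exact Or.inl hx'
          · exact Or.inr hvr
        · exact Or.inr hx
      · rintro (hx | hx)
        · exact Or.inl (hsubV x hx)
        · exact Or.inr hx
    · intro x
      rw [ih2 x]
      constructor
      · rintro (hc | ⟨s, hs, hsV, hr⟩)
        · rcases List.mem_append.mp hc with hc | hc
          · exact Or.inl hc
          · rcases List.mem_singleton.mp hc with rfl
            exact Or.inr ⟨x, List.mem_cons_self, hv, Relation.ReflTransGen.refl⟩
        · rcases List.mem_append.mp hs with hsn | hsr
          · obtain ⟨hadj, hI, hV'⟩ := (hnb s).mp hsn
            have hsv : s ∉ visited := fun h' => hV' (hsubV s h')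
            exact Or.inr ⟨v, List.mem_cons_self, hv,
              Relation.ReflTransGen.head ⟨hI, hadj, hsv⟩ (htr' s x hr)⟩
          · have hsv : s ∉ visited := fun h' => hsV (hsubV s h')
            exact Or.inr ⟨s, List.mem_cons_of_mem _ hsr, hsv, htr' s x hr⟩
      · rintro (hc | ⟨s, hs, hsv, hr⟩)
        · exact Or.inl (List.mem_append_left _ hc)
        · have hrr := pvReroute I adj (· ∈ visited) [v] s x hr
          rcases hrr with hxv | ⟨hsS, hr'⟩ | ⟨n, hnS, ⟨m, hmS, hstep⟩, hr'⟩
          · rcases List.mem_singleton.mp hxv with rfl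
            exact Or.inl (List.mem_append_right _ (by simp))
          · rcases List.mem_cons.mp hs with rfl | hsr
            · exact absurd (List.mem_singleton_self s) hsS
            · have hsV' : s ∉ PySem.Set.add visited v := by
                simp only [PySem.Set.mem_add]
                rintro (h' | rfl)
                · exact hsv h'
                · exact hsS (List.mem_singleton_self _)
              exact Or.inr ⟨s, List.mem_append_right _ hsr, hsV', htr s x hr'⟩
          · have hstep' : pvStep I adj (· ∈ visited) v n := by
              rwa [List.mem_singleton.mp hmS] at hstep
            obtain ⟨hnI, hnadj, hnv⟩ := hstep'
            have hnV' : n ∉ PySem.Set.add visited v := by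
              simp only [PySem.Set.mem_add]
              rintro (h' | rfl)
              · exact hnv h'
              · exact hnS (List.mem_singleton_self _)
            exact Or.inr ⟨n, List.mem_append_left _ ((hnb n).mpr ⟨hnadj, hnI, hnV'⟩), hnV', htr n x hr'⟩

theorem pvDfsA_nodup (I : List Int) (adj : List (Int × List Int)) :
    ∀ (visited stack comp : List Int) (h : ∀ x ∈ stack, x ∈ I),
      comp.Nodup → (∀ x ∈ comp, x ∈ visited) →
      ((pvDfsA I adj visited stack comp h).2).Nodup := by
  intro visited stack comp h
  fun_induction pvDfsA I adj visited stack comp h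
  case case1 visited comp => exact fun hn _ => hn
  case case2 =>
    rename_i visited comp v rest hstack hv hdup ih
    exact ih
  case case3 =>
    rename_i visited comp v rest hstack hv hdup ih
    intro hn hcv
    apply ih
    · rw [List.nodup_append]
      refine ⟨hn, List.nodup_singleton v, ?_⟩
      intro a ha b hb
      have hbv := List.mem_singleton.mp hb
      subst hbv
      exact fun e => hv (e ▸ hcv a ha)
    · intro x hx
      rcases List.mem_append.mp hx with hx | hx
      · simp only [PySem.Set.mem_add]
        exact Or.inl (hcv x hx)
      · rcases List.mem_singleton.mp hx with rfl
        simp [PySem.Set.mem_add]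

theorem pvSatB_spec (I : List Int) (adj : List (Int × List Int)) (visited : List Int) :
    ∀ (comp frontier : List Int), (∀ u ∈ frontier, u ∈ comp) →
      ∀ x, x ∈ pvSatB I adj visited comp frontier ↔
        x ∈ comp ∨ ∃ u ∈ frontier,
          Relation.ReflTransGen (pvStep I adj (fun y => y ∈ visited ∨ y ∈ comp)) u x := by
  intro comp frontier
  fun_induction pvSatB I adj visited comp frontier
  case case1 comp =>
    intro _ x; simp
  case case2 comp f fs ih =>
    intro hf x
    have hsub : ∀ y : Int, y ∈ comp → y ∈ PySem.Set.update comp (pvNext I adj visited comp (f :: fs)) := by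
      intro y hy; simp [PySem.Set.mem_update]; exact Or.inl hy
    have hnxtsub : ∀ u ∈ pvNext I adj visited comp (f :: fs), u ∈ PySem.Set.update comp (pvNext I adj visited comp (f :: fs)) := by
      intro u hu; simp [PySem.Set.mem_update]; exact Or.inr hu
    have hAiff : ∀ y : Int, (y ∈ visited ∨ y ∈ PySem.Set.update comp (pvNext I adj visited comp (f :: fs))) ↔ ((y ∈ visited ∨ y ∈ comp) ∨ y ∈ pvNext I adj visited comp (f :: fs)) := by
      intro y; simp [PySem.Set.mem_update]; tauto
    rw [ih hnxtsub x]
    constructor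
    · rintro (hc | ⟨u, hu, hr⟩)
      · simp only [PySem.Set.mem_update] at hc
        rcases hc with hc | hc
        · exact Or.inl hc
        · obtain ⟨⟨w, hw, hxw⟩, hxI, hxv, hxc⟩ := (pvMem_next I adj visited comp (f :: fs) x).mp hc
          exact Or.inr ⟨w, hw, Relation.ReflTransGen.head ⟨hxI, hxw, by tauto⟩ Relation.ReflTransGen.refl⟩
      · obtain ⟨⟨w, hw, huw⟩, huI, huv, huc⟩ := (pvMem_next I adj visited comp (f :: fs) u).mp hu
        refine Or.inr ⟨w, hw, Relation.ReflTransGen.head ⟨huI, huw, by tauto⟩ ?_⟩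
        refine pvReach_mono I adj _ _ ?_ u x hr
        intro y hy
        rcases hy with hy | hy
        · exact Or.inl hy
        · exact Or.inr (hsub y hy)
    · rintro (hc | ⟨u, hu, hr⟩)
      · exact Or.inl (hsub x hc)
      · rcases (Relation.ReflTransGen.cases_head hr) with rfl | ⟨b, hub, hbx⟩
        · exact Or.inl (hsub u (hf u hu))
        · have hbn : b ∈ pvNext I adj visited comp (f :: fs) := by
            refine (pvMem_next I adj visited comp (f :: fs) b).mpr ⟨⟨u, hu, hub.2.1⟩, hub.1, ?_, ?_⟩
            · exact fun h' => hub.2.2 (Or.inl h')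
            · exact fun h' => hub.2.2 (Or.inr h')
          have hrr := pvReroute I adj (fun y => y ∈ visited ∨ y ∈ comp) (pvNext I adj visited comp (f :: fs)) b x hbx
          rcases hrr with hxn | ⟨hbS, _⟩ | ⟨n, hnS, ⟨m, hmS, hstep⟩, hr'⟩
          · exact Or.inl (by simp [PySem.Set.mem_update]; exact Or.inr hxn)
          · exact absurd hbn hbS
          · obtain ⟨hnI, hnadj, hnav⟩ := hstep
            refine Or.inr ⟨m, hmS, Relation.ReflTransGen.head ⟨hnI, hnadj, ?_⟩ ?_⟩
            · intro h'
              rcases (hAiff n).mp h' with ((h'' | h'') | h'')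
              · exact hnav (Or.inl h'')
              · exact hnav (Or.inr h'')
              · exact hnS h''
            · refine pvReach_mono I adj _ _ ?_ n x hr'
              intro y hy
              exact (hAiff y).mp hy

theorem pvSatB_nodup (I : List Int) (adj : List (Int × List Int)) (visited : List Int) :
    ∀ (comp frontier : List Int), comp.Nodup → (pvSatB I adj visited comp frontier).Nodup := by
  intro comp frontier
  fun_induction pvSatB I adj visited comp frontier
  case case1 comp => exact fun hn => hn
  case case2 comp f fs ih => exact fun hn => ih (PySem.Set.nodup_update _ _ hn)

-- the single-start components of A and B have the same members
theorem pvComp_eq (I : List Int) (adj : List (Int × List Int)) (vA vB : List Int)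
    (hv : ∀ x, x ∈ vA ↔ x ∈ vB) (s : Int) (hsv : s ∉ vA) (h : ∀ x ∈ [s], x ∈ I) :
    ∀ x, x ∈ (pvDfsA I adj vA [s] [] h).2 ↔ x ∈ pvSatB I adj vB [s] [s] := by
  intro x
  obtain ⟨_, sp2⟩ := pvDfsA_spec I adj vA [s] [] h (by simp)
  rw [sp2 x, pvSatB_spec I adj vB [s] [s] (by simp) x]
  have hsvB : s ∉ vB := fun h' => hsv ((hv s).mpr h')
  constructor
  · rintro (h0 | ⟨t, ht, htv, hr⟩)
    · simp at h0
    · have hts := List.mem_singleton.mp ht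
      subst hts
      have hrB : Relation.ReflTransGen (pvStep I adj (· ∈ vB)) t x :=
        pvReach_mono I adj _ _ (fun y hy => (hv y).mpr hy) t x hr
      rcases pvReroute I adj (· ∈ vB) [t] t x hrB with hx1 | ⟨htS, _⟩ | ⟨n, hnS, ⟨m, hmS, hstep⟩, hr'⟩
      · exact Or.inl hx1
      · exact absurd (List.mem_singleton_self t) htS
      · have hstep' : pvStep I adj (· ∈ vB) t n := by
          rwa [List.mem_singleton.mp hmS] at hstep
        refine Or.inr ⟨t, List.mem_singleton_self t, Relation.ReflTransGen.head ⟨hstep'.1, hstep'.2.1, ?_⟩ hr'⟩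
        rintro (h' | h')
        · exact hstep'.2.2 h'
        · exact hnS h'
  · rintro (hx | ⟨u, hu, hr⟩)
    · exact Or.inr ⟨s, List.mem_singleton_self s, hsv,
        by rw [List.mem_singleton.mp hx]⟩
    · rw [List.mem_singleton.mp hu] at hr
      refine Or.inr ⟨s, List.mem_singleton_self s, hsv, ?_⟩
      refine pvReach_mono I adj _ _ ?_ s x hr
      intro y hy
      exact Or.inl ((hv y).mp hy)

theorem pvLoop_eq (I : List Int) (adj : List (Int × List Int)) :
    ∀ (starts : List Int) (h : ∀ x ∈ starts, x ∈ I) (vA vB : List Int) (comps : List (List Int)),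
      (∀ x, x ∈ vA ↔ x ∈ vB) →
      pvLoopA I adj starts h vA comps = pvLoopB I adj starts vB comps := by
  intro starts
  induction starts with
  | nil => intro h vA vB comps hv; simp [pvLoopA, pvLoopB]
  | cons s rest ih =>
    intro h vA vB comps hv
    by_cases hs : s ∈ vA
    · have hs' : s ∈ vB := (hv s).mp hs
      simp only [pvLoopA, pvLoopB, if_pos hs, if_pos hs']
      exact ih _ _ _ _ hv
    · have hs' : s ∉ vB := fun h' => hs ((hv s).mpr h')
      simp only [pvLoopA, pvLoopB, if_neg hs, if_neg hs']
      have hsI : ∀ x ∈ ([s] : List Int), x ∈ I := by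
        intro x hx
        rcases List.mem_singleton.mp hx with rfl
        exact h x List.mem_cons_self
      have hmem := pvComp_eq I adj vA vB hv s hs hsI
      have hndA : ((pvDfsA I adj vA [s] [] hsI).2).Nodup :=
        pvDfsA_nodup I adj vA [s] [] hsI List.nodup_nil (by simp)
      have hndB : (pvSatB I adj vB [s] [s]).Nodup :=
        pvSatB_nodup I adj vB [s] [s] (List.nodup_singleton s)
      have hperm : ((pvDfsA I adj vA [s] [] hsI).2).Perm (pvSatB I adj vB [s] [s]) :=
        (List.perm_ext_iff_of_nodup hndA hndB).mpr hmem
      have hsorted : PySem.List.sorted ((pvDfsA I adj vA [s] [] hsI).2) (fun x => x) false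
          = PySem.List.sorted (pvSatB I adj vB [s] [s]) (fun x => x) false :=
        PySem.List.sorted_eq_sorted_of_perm _ _ _ (fun a b e => e) hperm
      have hv' : ∀ x, x ∈ (pvDfsA I adj vA [s] [] hsI).1 ↔ x ∈ PySem.Set.update vB (pvSatB I adj vB [s] [s]) := by
        intro x
        obtain ⟨sp1, _⟩ := pvDfsA_spec I adj vA [s] [] hsI (by simp)
        rw [sp1 x]
        simp only [PySem.Set.mem_update]
        constructor
        · rintro (h1 | h1)
          · exact Or.inl ((hv x).mp h1)
          · exact Or.inr ((hmem x).mp h1)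
        · rintro (h1 | h1)
          · exact Or.inl ((hv x).mpr h1)
          · exact Or.inr ((hmem x).mpr h1)
      have hfin : pvLoopA I adj rest (fun x hx => h x (List.mem_cons_of_mem _ hx)) (pvDfsA I adj vA [s] [] hsI).1 (comps ++ [PySem.List.sorted ((pvDfsA I adj vA [s] [] hsI).2) (fun x => x) false]) = pvLoopB I adj rest (PySem.Set.update vB (pvSatB I adj vB [s] [s])) (comps ++ [PySem.List.sorted (pvSatB I adj vB [s] [s]) (fun x => x) false]) := by
        rw [hsorted]
        exact ih _ _ _ _ hv'
      exact hfin

-- ===== VERDICT (by name: the statement is the Claim_ definition above) =====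
theorem interior_components_py_spec : Claim_equal_interior_components_py := by
  intro iv adj _ _
  unfold Spec_interior_components_py interior_components_py interior_components_py_alt
  exact pvLoop_eq iv adj _ _ [] [] [] (fun x => Iff.rfl)
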